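-- pv_equiv track=rewrite | github.com/Wulfic/Cicada3301 | Tools/parse_166_words.py | segment_greedy
-- ===== SOURCE A (Python) =====
-- def segment_greedy(text, vocabulary):
--     """Try to segment text into known words (greedy, longest match)"""
--     vocab = sorted(vocabulary, key=lambda x: -len(x))  # Longest first
--     result = []
--     remaining = text
--
--     while remaining:
--         matched = False
--         for word in vocab:
--             if remaining.startswith(word):
--                 result.append(word)
--                 remaining = remaining[len(word):]
--                 matched = True
--                 break
--         if not matched:
--             # Take single character
--             result.append(remaining[0])
--             remaining = remaining[1:]
--
--     return result
-- ===== SOURCE B (Python) =====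
-- def segment_greedy(text, vocabulary):
--     """Greedy longest-match segmentation via a set of words bucket-checked by
--     decreasing substring length at each position (no vocabulary scan per step)."""
--     words = {w for w in vocabulary if w}
--     max_len = max(map(len, vocabulary), default=0)
--     result = []
--     i = 0
--     n = len(text)
--     while i < n:
--         piece = None
--         for L in reversed(range(1, min(max_len, n - i) + 1)):
--             cand = text[i:i + L]
--             if cand in words:
--                 piece = cand
--                 break
--         if piece is None:
--             piece = text[i]
--         result.append(piece)
--         i += len(piece)
--     return result
-- ===== Notes on version B (the rewrite author's own statement) =====
-- stated objective: faster
-- what changed: Replaces A's per-position scan of the length-sorted vocabulary (prefix test per word) by a precomputed word set and, at each position, membership tests of the decreasing-length substrings, so each step costs O(maxlen) lookups instead of O(|vocab|) prefix comparisons.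
-- outside the precondition, e.g. on segment_greedy('ab', ['', 'b']): A does not finish within the time limit, B returns ['a', 'b']; on segment_greedy('bb', ['', 'b']): A returns ['b', 'b'], B returns ['b', 'b']
import Mathlib
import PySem

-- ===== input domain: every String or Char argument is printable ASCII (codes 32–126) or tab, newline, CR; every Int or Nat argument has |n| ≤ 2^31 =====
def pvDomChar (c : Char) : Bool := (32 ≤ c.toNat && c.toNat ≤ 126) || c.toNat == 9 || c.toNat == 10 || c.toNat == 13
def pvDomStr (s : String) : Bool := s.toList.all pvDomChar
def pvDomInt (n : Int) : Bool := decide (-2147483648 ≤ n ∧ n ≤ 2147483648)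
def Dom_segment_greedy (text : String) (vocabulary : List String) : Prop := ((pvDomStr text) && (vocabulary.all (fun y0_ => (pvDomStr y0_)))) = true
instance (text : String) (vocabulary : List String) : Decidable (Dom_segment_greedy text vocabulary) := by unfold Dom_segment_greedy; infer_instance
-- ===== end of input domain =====

-- B replaces the per-step scan over the length-sorted vocabulary by a set lookup of
-- decreasing-length substrings at each position.

-- ===== PORT A =====
-- the while-loop of A; fuel = length of the text suffices on Pre_ (each iteration
-- consumes at least one character when '' is not in the vocabulary)
def pvLoopA (vocab : List String) : Nat → List Char → List String
  | _, [] => []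
  | 0, _ :: _ => []
  | fuel + 1, c :: rest =>
    match vocab.find? (fun w => PySem.Chars.startswith (c :: rest) w.toList) with
    | some w => w :: pvLoopA vocab fuel ((c :: rest).drop w.toList.length)
    | none => String.ofList [c] :: pvLoopA vocab fuel rest

def segment_greedy (text : String) (vocabulary : List String) : List String :=
  let vocab := PySem.List.sorted vocabulary (fun x => -(PySem.Str.len x)) false
  pvLoopA vocab text.toList.length text.toList

-- ===== PORT B =====
-- the while-loop of B: at each position try substring lengths min(maxLen, n-i) … 1
-- against the word set; fuel = length of the text (each iteration consumes ≥ 1 char)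
def pvLoopB (words : PySem.Set (List Char)) (maxLen : Nat) : Nat → List Char → List String
  | _, [] => []
  | 0, _ :: _ => []
  | fuel + 1, c :: rest =>
    match ((List.range' 1 (min maxLen (c :: rest).length)).reverse).find?
        (fun L => words.contains ((c :: rest).take L)) with
    | some L => String.ofList ((c :: rest).take L) :: pvLoopB words maxLen fuel ((c :: rest).drop L)
    | none => String.ofList [c] :: pvLoopB words maxLen fuel rest

def segment_greedy_alt (text : String) (vocabulary : List String) : List String :=
  let words : PySem.Set (List Char) :=
    PySem.Set.ofList ((vocabulary.filter (fun w => !(w == ""))).map String.toList)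
  let maxLen := PySem.List.maxD (vocabulary.map (fun w => w.toList.length)) (fun x => x) 0
  pvLoopB words maxLen text.toList.length text.toList

-- ===== PRECONDITION & SPEC =====
-- Pre_ excludes nonempty texts when '' is in the vocabulary: there A's while-loop can match
-- '' forever (it diverges whenever some position has no nonempty vocabulary-word match).
def Pre_segment_greedy (text : String) (vocabulary : List String) : Prop :=
  "" ∈ vocabulary → text = ""
instance (text : String) (vocabulary : List String) : Decidable (Pre_segment_greedy text vocabulary) := by unfold Pre_segment_greedy; infer_instance

def pvWitness_segment_greedy : String × List String := ("abracadabra", ["abra", "ra", "c", "ad"])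

def Spec_segment_greedy (text : String) (vocabulary : List String) (out : List String) : Prop := out = segment_greedy_alt text vocabulary
instance (text : String) (vocabulary : List String) (out : List String) : Decidable (Spec_segment_greedy text vocabulary out) := by unfold Spec_segment_greedy; infer_instance

-- ===== CLAIM (what is proved, stated in full; the proofs are below) =====
def Claim_equal_segment_greedy : Prop := ∀ (text : String) (vocabulary : List String), Dom_segment_greedy text vocabulary → Pre_segment_greedy text vocabulary → Spec_segment_greedy text vocabulary (segment_greedy text vocabulary)

-- ===== LEMMAS AND PROOFS =====

theorem pv_len_le_maxLen (vocabulary : List String) {w : String} (hw : w ∈ vocabulary) :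
    w.toList.length ≤ PySem.List.maxD (vocabulary.map (fun w => w.toList.length)) (fun x => x) 0 := by
  unfold PySem.List.maxD
  cases h : PySem.List.max? (vocabulary.map (fun w => w.toList.length)) (fun x => x) with
  | none =>
    rw [PySem.List.max?_eq_none_iff] at h
    simp only [List.map_eq_nil_iff] at h
    subst h; simp at hw
  | some m =>
    simpa using PySem.List.max?_isMax h _ (List.mem_map_of_mem hw)

theorem pv_find?_desc (p : Nat → Bool) (m k : Nat) (hk1 : 1 ≤ k) (hkm : k ≤ m)
    (hp : p k = true) (hgt : ∀ L, k < L → L ≤ m → p L = false) :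
    ((List.range' 1 m).reverse).find? p = some k := by
  induction m with
  | zero => omega
  | succ n ih =>
    rw [List.range'_1_concat, List.reverse_append]
    simp only [List.reverse_singleton, List.singleton_append, List.find?_cons]
    rcases Nat.lt_or_ge k (n+1) with hlt | hge
    · have hf : p (1 + n) = false := hgt (1 + n) (by omega) (by omega)
      rw [hf]
      exact ih (by omega) (fun L h1 h2 => hgt L h1 (by omega))
    · have hk : k = n + 1 := by omega
      subst hk
      have he : (1 + n) = n + 1 := by omega
      rw [he, hp]

theorem pv_find?_desc_none (p : Nat → Bool) (m : Nat)
    (h : ∀ L, 1 ≤ L → L ≤ m → p L = false) :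
    ((List.range' 1 m).reverse).find? p = none := by
  rw [List.find?_eq_none]
  intro L hL
  rw [List.mem_reverse, List.mem_range'_1] at hL
  simp [h L hL.1 (by omega)]

theorem pv_mem_words (vocabulary : List String) (cand : List Char) :
    ((PySem.Set.ofList ((vocabulary.filter (fun w => !(w == ""))).map String.toList)).contains cand = true)
      ↔ ∃ v ∈ vocabulary, v ≠ "" ∧ v.toList = cand := by
  rw [PySem.Set.contains_iff, PySem.Set.mem_ofList]
  simp only [List.mem_map, List.mem_filter]
  constructor
  · rintro ⟨v, ⟨hv, hne⟩, rfl⟩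
    refine ⟨v, hv, ?_, rfl⟩
    simpa using hne
  · rintro ⟨v, hv, hne, rfl⟩
    exact ⟨v, ⟨hv, by simpa using hne⟩, rfl⟩


theorem pv_loop_eq (vocabulary : List String) (h0 : "" ∉ vocabulary) :
    ∀ (fuel : Nat) (rem : List Char),
      pvLoopA (PySem.List.sorted vocabulary (fun x => -(PySem.Str.len x)) false) fuel rem =
      pvLoopB (PySem.Set.ofList ((vocabulary.filter (fun w => !(w == ""))).map String.toList))
        (PySem.List.maxD (vocabulary.map (fun w => w.toList.length)) (fun x => x) 0) fuel rem := by
  intro fuel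
  set vocab' := PySem.List.sorted vocabulary (fun x => -(PySem.Str.len x)) false with hv
  set words := PySem.Set.ofList ((vocabulary.filter (fun w => !(w == ""))).map String.toList) with hwords
  set maxLen := PySem.List.maxD (vocabulary.map (fun w => w.toList.length)) (fun x => x) 0 with hml
  induction fuel with
  | zero => intro rem; cases rem <;> rfl
  | succ fuel ih =>
    intro rem
    cases rem with
    | nil => rfl
    | cons c rest =>
      rw [pvLoopA, pvLoopB]
      cases hA : vocab'.find? (fun w => PySem.Chars.startswith (c :: rest) w.toList) with
      | some w =>
        rw [List.find?_eq_some_iff_append] at hA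
        obtain ⟨hpw, as, bs, hsplit, hnone⟩ := hA
        rw [PySem.Chars.startswith_iff] at hpw
        have hwmem : w ∈ vocabulary :=
          (PySem.List.mem_sorted vocabulary (fun x => -(PySem.Str.len x)) false w).mp
            (by rw [← hv, hsplit]; simp)
        have hwne : w ≠ "" := fun h => h0 (h ▸ hwmem)
        have hk1 : 1 ≤ w.toList.length := by
          rcases Nat.eq_zero_or_pos w.toList.length with h | h
          · exfalso; apply hwne
            rw [List.length_eq_zero_iff] at h
            rw [← @String.ofList_toList w, h]
          · exact h
        have hklen : w.toList.length ≤ (c :: rest).length := hpw.length_le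
        have hkml : w.toList.length ≤ maxLen := pv_len_le_maxLen vocabulary hwmem
        have htake : (c :: rest).take w.toList.length = w.toList :=
          (List.prefix_iff_eq_take.mp hpw).symm
        -- the descending find? in B returns exactly w.toList.length
        have hB : ((List.range' 1 (min maxLen (c :: rest).length)).reverse).find?
            (fun L => words.contains ((c :: rest).take L)) = some w.toList.length := by
          apply pv_find?_desc _ _ _ hk1 (by omega)
          · simp only [htake]
            exact (pv_mem_words vocabulary w.toList).mpr ⟨w, hwmem, hwne, rfl⟩
          · intro L hgt hle
            by_contra hcontra
            rw [Bool.not_eq_false] at hcontra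
            obtain ⟨v, hvmem, hvne, hveq⟩ := (pv_mem_words vocabulary _).mp hcontra
            have hLlen : L ≤ (c :: rest).length := by omega
            have hvlen : v.toList.length = L := by
              rw [hveq, List.length_take]; omega
            have hvpre : v.toList <+: (c :: rest) := hveq ▸ List.take_prefix _ _
            -- v is in the sorted vocab; longer than w, so it must come before w
            have hvmem' : v ∈ vocab' := by
              rw [PySem.List.mem_sorted]; exact hvmem
            have hpair := PySem.List.sorted_pairwise vocabulary (fun x => -(PySem.Str.len x))
            rw [← hv, hsplit] at hpair
            rw [hsplit] at hvmem'
            rcases List.mem_append.mp hvmem' with hvas | hvwbs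
            · have := hnone v hvas
              simp only [Bool.not_eq_eq_eq_not, Bool.not_true] at this
              simp [(PySem.Chars.startswith_iff (c :: rest) v.toList).mpr hvpre] at this
            · -- v = w or v ∈ bs: both give length v ≤ length w, contradiction
              have hlenle : v.toList.length ≤ w.toList.length := by
                rcases List.mem_cons.mp hvwbs with rfl | hvbs
                · omega
                · have hp2 := (List.pairwise_append.mp hpair).2.1
                  have := (List.pairwise_cons.mp hp2).1 v hvbs
                  simp only [PySem.Str.len_eq, neg_le_neg_iff] at this
                  exact_mod_cast this
              omega
        rw [hB]
        show w :: pvLoopA vocab' fuel (List.drop w.toList.length (c :: rest)) =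
          String.ofList (List.take w.toList.length (c :: rest)) ::
            pvLoopB words maxLen fuel (List.drop w.toList.length (c :: rest))
        rw [htake, String.ofList_toList, ih]
      | none =>
        rw [List.find?_eq_none] at hA
        have hB : ((List.range' 1 (min maxLen (c :: rest).length)).reverse).find?
            (fun L => words.contains ((c :: rest).take L)) = none := by
          apply pv_find?_desc_none
          intro L h1 h2
          by_contra hcontra
          rw [Bool.not_eq_false] at hcontra
          obtain ⟨v, hvmem, hvne, hveq⟩ := (pv_mem_words vocabulary _).mp hcontra
          have hvmem' : v ∈ vocab' := by rw [PySem.List.mem_sorted]; exact hvmem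
          have := hA v hvmem'
          rw [PySem.Chars.startswith_iff] at this
          exact this (hveq ▸ List.take_prefix _ _)
        rw [hB]
        show String.ofList [c] :: pvLoopA vocab' fuel rest =
          String.ofList [c] :: pvLoopB words maxLen fuel rest
        rw [ih]

-- ===== VERDICT (by name: the statement is the Claim_ definition above) =====
theorem segment_greedy_spec : Claim_equal_segment_greedy := by
  intro text vocabulary _hdom hpre
  unfold Spec_segment_greedy segment_greedy segment_greedy_alt
  by_cases hmem : "" ∈ vocabulary
  · have ht : text = "" := hpre hmem
    subst ht; rfl
  · exact pv_loop_eq vocabulary hmem _ _
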